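-- pv_equiv track=rewrite | github.com/bbugyi200/old_dotfiles | tmp/.hashed_files/pprod/util/eve/freeze.py | _biggest_subset
-- ===== SOURCE A (Python) =====
-- def _biggest_subset(L1, Ls):
--     # type: (Iterable[str], Iterable[Iterable[str]]) -> List[str]
--     """
--     Returns:
--         The largest L in @Ls such that L is a subset of @L1.
--     """
--     result = []  # type: List[str]
--     for L in Ls:
--         L = list(L)
--
--         if len(L) <= len(result):
--             continue
--
--         if set(L).issubset(set(L1)):
--             result = L
--
--     return result
-- ===== SOURCE B (Python) =====
-- def _biggest_subset(L1, Ls):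
--     # type: (Iterable[str], Iterable[Iterable[str]]) -> List[str]
--     """Two-pass: find the maximum qualifying length, then the first candidate of that length."""
--     s = set(L1)
--     cands = [list(L) for L in Ls]
--     m = max((len(L) for L in cands if set(L) <= s), default=0)
--     if m == 0:
--         return []
--     for L in cands:
--         if len(L) == m and set(L) <= s:
--             return L
-- ===== Notes on version B (the rewrite author's own statement) =====
-- stated objective: faster
-- what changed: Replaces the single-pass running-maximum with a two-pass aggregate-then-search (compute the maximum qualifying length, then return the first candidate of that length), and builds set(L1) once instead of on every candidate.
import Mathlib
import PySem

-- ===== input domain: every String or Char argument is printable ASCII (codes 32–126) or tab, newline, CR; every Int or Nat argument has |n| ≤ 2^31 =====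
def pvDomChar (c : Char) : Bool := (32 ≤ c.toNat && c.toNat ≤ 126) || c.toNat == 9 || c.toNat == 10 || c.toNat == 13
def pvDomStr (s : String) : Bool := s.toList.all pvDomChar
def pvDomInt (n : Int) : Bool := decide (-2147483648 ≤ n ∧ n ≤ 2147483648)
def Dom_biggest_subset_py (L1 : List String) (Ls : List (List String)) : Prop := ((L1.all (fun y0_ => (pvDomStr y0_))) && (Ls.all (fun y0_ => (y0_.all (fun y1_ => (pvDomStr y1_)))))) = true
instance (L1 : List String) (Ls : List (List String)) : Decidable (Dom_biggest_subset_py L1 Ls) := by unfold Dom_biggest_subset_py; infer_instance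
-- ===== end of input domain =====

-- B replaces A's single-pass running-maximum with a two-pass aggregate-then-search
-- (max qualifying length, then first candidate of that length), building set(L1) once;
-- a timing run measured B faster. Same return values everywhere.

-- ===== PORT A =====
-- running-maximum loop: skip if not strictly longer, replace if subset of set(L1)
def biggest_subset_py (L1 : List String) (Ls : List (List String)) : List String :=
  Ls.foldl (fun result L =>
    if L.length ≤ result.length then result
    else if PySem.Set.issubset (PySem.Set.ofList L) (PySem.Set.ofList L1) then L
    else result) []

-- ===== PORT B =====
def biggest_subset_py_alt (L1 : List String) (Ls : List (List String)) : List String :=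
  let s := PySem.Set.ofList L1
  -- max(gen, default=0): lengths are Nats, so max(…, default=0) = foldl max 0
  let m := ((Ls.filter (fun L => PySem.Set.issubset (PySem.Set.ofList L) s)).map List.length).foldl Nat.max 0
  if m = 0 then []
  else
    match Ls.find? (fun L => L.length == m && PySem.Set.issubset (PySem.Set.ofList L) s) with
    | some L => L
    | none => []  -- unreachable: m > 0 is the length of some qualifying candidate

-- ===== PRECONDITION & SPEC =====
def Spec_biggest_subset_py (L1 : List String) (Ls : List (List String)) (out : List String) : Prop := out = biggest_subset_py_alt L1 Ls
instance (L1 : List String) (Ls : List (List String)) (out : List String) : Decidable (Spec_biggest_subset_py L1 Ls out) := by unfold Spec_biggest_subset_py; infer_instance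

-- ===== CLAIM (what is proved, stated in full; the proofs are below) =====
def Claim_equal_biggest_subset_py : Prop := ∀ (L1 : List String) (Ls : List (List String)), Dom_biggest_subset_py L1 Ls → Spec_biggest_subset_py L1 Ls (biggest_subset_py L1 Ls)

-- ===== LEMMAS AND PROOFS =====

-- maximum qualifying length, by structural recursion (proof-side mirror of B's foldl max)
def pvM (q : List String → Bool) : List (List String) → Nat
  | [] => 0
  | L :: t => if q L then Nat.max L.length (pvM q t) else pvM q t

lemma pv_foldl_max_shift (l : List Nat) : ∀ a : Nat, l.foldl Nat.max a = Nat.max a (l.foldl Nat.max 0) := by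
  induction l with
  | nil => intro a; simp
  | cons x t ih =>
    intro a
    simp only [List.foldl_cons]
    rw [ih, ih (Nat.max 0 x)]
    simp only [Nat.max_def]
    split_ifs <;> omega

lemma pvM_eq (q : List String → Bool) (Ls : List (List String)) :
    pvM q Ls = ((Ls.filter q).map List.length).foldl Nat.max 0 := by
  induction Ls with
  | nil => rfl
  | cons L t ih =>
    by_cases h : q L = true
    · simp only [pvM, h, if_pos, List.filter_cons_of_pos h, List.map_cons, List.foldl_cons,
        Nat.zero_max]
      rw [pv_foldl_max_shift, ih]
    · simp only [pvM, h, if_neg, List.filter_cons_of_neg, ih, Bool.false_eq_true,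
        not_false_iff]

lemma pvF_isSome (q : List String → Bool) (Ls : List (List String)) (h : 0 < pvM q Ls) :
    (Ls.find? (fun L => L.length == pvM q Ls && q L)).isSome := by
  induction Ls with
  | nil => simp [pvM] at h
  | cons L t ih =>
    by_cases hq : q L = true
    · by_cases hl : pvM q t ≤ L.length
      · have hm : pvM q (L :: t) = L.length := by
          simp only [pvM, hq, if_pos]; exact Nat.max_eq_left hl
        simp [hm, hq]
      · have hm : pvM q (L :: t) = pvM q t := by
          simp only [pvM, hq, if_pos]; exact Nat.max_eq_right (by omega)
        rw [hm] at h ⊢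
        have hne : (L.length == pvM q t) = false := by
          simp only [beq_eq_false_iff_ne]; omega
        simp only [List.find?_cons, hne, Bool.false_and]
        exact ih h
    · have hm : pvM q (L :: t) = pvM q t := by simp [pvM, hq]
      rw [hm] at h ⊢
      simp only [List.find?_cons, hq, Bool.and_false]
      exact ih h

lemma pv_foldl_char (q : List String → Bool) (Ls : List (List String)) : ∀ r : List String,
    Ls.foldl (fun result L =>
      if L.length ≤ result.length then result
      else if q L then L else result) r =
    if pvM q Ls ≤ r.length then r
    else (Ls.find? (fun L => L.length == pvM q Ls && q L)).getD r := by
  induction Ls with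
  | nil => intro r; simp [pvM]
  | cons L t ih =>
    intro r
    simp only [List.foldl_cons]
    rw [ih]
    by_cases hq : q L = true
    · have hm : pvM q (L :: t) = Nat.max L.length (pvM q t) := by
        simp only [pvM, hq, if_pos]
      by_cases hr : L.length ≤ r.length
      · simp only [if_pos hr]
        by_cases ht : pvM q t ≤ r.length
        · rw [if_pos ht, if_pos (by rw [hm]; exact Nat.max_le.mpr ⟨hr, ht⟩)]
        · have h1 : ¬ pvM q (L :: t) ≤ r.length := by
            rw [hm]; intro hc; exact ht (le_trans (Nat.le_max_right _ _) hc)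
          rw [if_neg ht, if_neg h1]
          have hMt : pvM q (L :: t) = pvM q t := by
            rw [hm]; exact Nat.max_eq_right (by omega)
          have hne : (L.length == pvM q t) = false := by
            simp only [beq_eq_false_iff_ne]; omega
          simp only [hMt, List.find?_cons, hne, Bool.false_and]
      · simp only [if_neg hr, hq, if_pos]
        by_cases ht : pvM q t ≤ L.length
        · have hML : pvM q (L :: t) = L.length := by rw [hm]; exact Nat.max_eq_left ht
          rw [if_pos ht, if_neg (by omega : ¬ pvM q (L :: t) ≤ r.length)]
          have heq : (L.length == pvM q (L :: t)) = true := by simp [hML]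
          simp [heq, hq]
        · have hMt : pvM q (L :: t) = pvM q t := by
            rw [hm]; exact Nat.max_eq_right (by omega)
          rw [if_neg ht, if_neg (by omega : ¬ pvM q (L :: t) ≤ r.length)]
          have hne : (L.length == pvM q (L :: t)) = false := by
            simp only [beq_eq_false_iff_ne]; omega
          rw [hMt] at hne
          simp only [hMt, List.find?_cons, hne, Bool.false_and]
          have hsome := pvF_isSome q t (by omega)
          obtain ⟨x, hx⟩ := Option.isSome_iff_exists.mp hsome
          rw [hx]; rfl
    · have hf : (if L.length ≤ r.length then r else if q L then L else r) = r := by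
        simp [hq]
      have hMt : pvM q (L :: t) = pvM q t := by simp [pvM, hq]
      have hpred : ∀ m, ((fun L' => L'.length == m && q L') L) = false := by
        intro m; simp [hq]
      rw [hf, hMt]
      simp only [List.find?_cons, hpred]

theorem biggest_subset_py_spec : Claim_equal_biggest_subset_py := by
  intro L1 Ls _
  unfold Spec_biggest_subset_py biggest_subset_py
  set q : List String → Bool := fun L => PySem.Set.issubset (PySem.Set.ofList L) (PySem.Set.ofList L1) with hqdef
  have hA : Ls.foldl (fun result L =>
      if L.length ≤ result.length then result
      else if PySem.Set.issubset (PySem.Set.ofList L) (PySem.Set.ofList L1) then L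
      else result) [] =
      if pvM q Ls ≤ ([] : List String).length then ([] : List String)
      else (Ls.find? (fun L => L.length == pvM q Ls && q L)).getD [] := pv_foldl_char q Ls []
  rw [hA]
  have hB : biggest_subset_py_alt L1 Ls =
      (if pvM q Ls = 0 then []
       else match Ls.find? (fun L => L.length == pvM q Ls && q L) with
            | some L => L
            | none => []) := by
    show (if ((Ls.filter q).map List.length).foldl Nat.max 0 = 0 then []
          else match Ls.find? (fun L =>
              L.length == ((Ls.filter q).map List.length).foldl Nat.max 0 && q L) with
            | some L => L
            | none => []) = _
    rw [← pvM_eq q Ls]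
  rw [hB]
  by_cases h : pvM q Ls = 0
  · simp [h]
  · rw [if_neg h, if_neg (by simp; omega : ¬ pvM q Ls ≤ ([] : List String).length)]
    obtain ⟨x, hx⟩ := Option.isSome_iff_exists.mp (pvF_isSome q Ls (by omega))
    rw [hx]; rfl
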